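-- pv_equiv track=rewrite | github.com/ChenZhengrong15/LeetCode_czr | LeetCode/76_Minimum_Window_Substring.py | is_cover
-- ===== SOURCE A (Python) =====
-- def is_cover(str1: str, str2: str):
--     # 判断 str1 是否完全覆盖 str2
--     dict1 = dict()
--     dict2 = dict()
--
--     for i in str1:
--         if i in dict1:
--             dict1[i] += 1
--         else:
--             dict1[i] = 1
--     for i in str2:
--         if i in dict2:
--             dict2[i] += 1
--         else:
--             dict2[i] = 1
--     for i in str2:
--         if i not in dict1 or dict1[i] < dict2[i]:
--             return False
--     return True
-- ===== SOURCE B (Python) =====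
-- def is_cover(str1: str, str2: str):
--     # Simpler decomposition: build one remaining-budget dict from str1,
--     # then consume it in a single pass over str2.
--     need = {}
--     for ch in str1:
--         need[ch] = need.get(ch, 0) + 1
--     for ch in str2:
--         if ch not in need or need[ch] == 0:
--             return False
--         need[ch] -= 1
--     return True
-- ===== Notes on version B (the rewrite author's own statement) =====
-- stated objective: simpler
-- what changed: Replaces A's two static count tables plus a third compare pass with a single remaining-budget dict built from str1 and consumed in one early-exiting pass over str2.
import Mathlib
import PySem

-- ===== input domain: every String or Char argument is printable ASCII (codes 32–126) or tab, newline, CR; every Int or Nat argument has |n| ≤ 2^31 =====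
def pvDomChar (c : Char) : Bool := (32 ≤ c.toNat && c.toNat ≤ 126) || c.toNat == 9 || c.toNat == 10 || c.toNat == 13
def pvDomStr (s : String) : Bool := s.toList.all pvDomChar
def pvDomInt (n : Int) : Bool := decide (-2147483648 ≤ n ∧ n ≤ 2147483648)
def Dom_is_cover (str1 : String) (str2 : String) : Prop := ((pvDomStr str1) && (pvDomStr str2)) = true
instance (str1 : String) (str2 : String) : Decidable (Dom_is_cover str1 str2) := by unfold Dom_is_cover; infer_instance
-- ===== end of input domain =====

-- B replaces A's two static count tables + compare pass with one remaining-budget dict consumed in a single early-exiting pass over str2 (simpler decomposition, same cost).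


-- ===== PORT A =====
def is_cover (str1 : String) (str2 : String) : Bool :=
  let dict1 := str1.toList.foldl
    (fun d i => if d.contains i then d.insert i (d.getD i 0 + 1) else d.insert i 1)
    (PySem.Dict.empty : PySem.Dict Char Int)
  let dict2 := str2.toList.foldl
    (fun d i => if d.contains i then d.insert i (d.getD i 0 + 1) else d.insert i 1)
    (PySem.Dict.empty : PySem.Dict Char Int)
  -- 'for i in str2: if … return False' / 'return True' = .all
  str2.toList.all (fun i => dict1.contains i && !(decide (dict1.getD i 0 < dict2.getD i 0)))

-- ===== PORT B =====
-- the consuming pass: early return False, mutating 'need'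
def coverLoop (need : PySem.Dict Char Int) : List Char → Bool
  | [] => true
  | c :: rest =>
      if !(need.contains c) || need.getD c 0 == 0 then false
      else coverLoop (need.insert c (need.getD c 0 - 1)) rest

def is_cover_alt (str1 : String) (str2 : String) : Bool :=
  let need := str1.toList.foldl
    (fun d ch => d.insert ch (d.getD ch 0 + 1))
    (PySem.Dict.empty : PySem.Dict Char Int)
  coverLoop need str2.toList

-- ===== PRECONDITION & SPEC =====
def Spec_is_cover (str1 : String) (str2 : String) (out : Bool) : Prop := out = is_cover_alt str1 str2
instance (str1 : String) (str2 : String) (out : Bool) : Decidable (Spec_is_cover str1 str2 out) := by unfold Spec_is_cover; infer_instance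

-- ===== CLAIM (what is proved, stated in full; the proofs are below) =====
def Claim_equal_is_cover : Prop := ∀ (str1 : String) (str2 : String), Dom_is_cover str1 str2 → Spec_is_cover str1 str2 (is_cover str1 str2)

-- ===== LEMMAS AND PROOFS =====

-- A's counting step inserts in both branches; pointwise it is getD + count
theorem getD_countFoldA (l : List Char) (d : PySem.Dict Char Int) (c : Char) :
    (l.foldl (fun d i => if d.contains i then d.insert i (d.getD i 0 + 1) else d.insert i 1) d).getD c 0
      = d.getD c 0 + l.count c := by
  induction l generalizing d with
  | nil => simp
  | cons a t ih =>
    simp only [List.foldl_cons, List.count_cons, ih]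
    by_cases hc : d.contains a = true
    · simp only [hc, if_true, PySem.Dict.getD_insert]
      by_cases h : c = a <;> simp [h] <;> first | omega | exact fun hh => h (Eq.symm hh)
    · have h0 : d.getD a 0 = 0 := PySem.Dict.getD_of_not_contains d 0 (by simpa using hc)
      simp only [hc, if_false, Bool.false_eq_true, PySem.Dict.getD_insert]
      by_cases h : c = a <;> simp [h, h0] <;> first | omega | exact fun hh => h (Eq.symm hh)

theorem contains_countFoldA (l : List Char) (d : PySem.Dict Char Int) (c : Char) :
    (l.foldl (fun d i => if d.contains i then d.insert i (d.getD i 0 + 1) else d.insert i 1) d).contains c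
      = (d.contains c || l.contains c) := by
  induction l generalizing d with
  | nil => simp
  | cons a t ih =>
    simp only [List.foldl_cons, ih]
    by_cases hc : d.contains a = true <;>
      simp only [hc, if_true, if_false, Bool.false_eq_true, PySem.Dict.contains_insert] <;>
      by_cases h : c = a <;>
      cases hdc : d.contains c <;> simp_all

theorem getD_countFoldB (l : List Char) (d : PySem.Dict Char Int) (c : Char) :
    (l.foldl (fun d ch => d.insert ch (d.getD ch 0 + 1)) d).getD c 0
      = d.getD c 0 + l.count c := by
  induction l generalizing d with
  | nil => simp
  | cons a t ih =>
    simp only [List.foldl_cons, ih, PySem.Dict.getD_insert]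
    by_cases h : c = a <;> simp [h] <;> first | omega | simp [Ne.symm h]

-- the budget loop succeeds iff the budget covers the multiset of the remaining list
theorem coverLoop_eq (l : List Char) (d : PySem.Dict Char Int)
    (hd : ∀ c, 0 ≤ d.getD c 0) :
    (coverLoop d l = true ↔ ∀ c, (l.count c : Int) ≤ d.getD c 0) := by
  induction l generalizing d with
  | nil => simp [coverLoop]; intro c; simpa using hd c
  | cons a t ih =>
    by_cases hz : d.getD a 0 = 0
    · have hcond : (!(d.contains a) || d.getD a 0 == 0) = true := by simp [hz]
      simp only [coverLoop, hcond, if_true]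
      constructor
      · intro h; exact absurd h (by simp)
      · intro h
        have := h a
        simp [hz] at this
        omega
    · have hcontains : d.contains a = true := by
        by_contra hc
        exact hz (PySem.Dict.getD_of_not_contains d 0 (by simpa using hc))
      have hcond : (!(d.contains a) || d.getD a 0 == 0) = false := by
        simp [hcontains, hz]
      simp only [coverLoop, hcond, Bool.false_eq_true, if_false]
      have hd' : ∀ c, 0 ≤ (d.insert a (d.getD a 0 - 1)).getD c 0 := by
        intro c
        rw [PySem.Dict.getD_insert]
        by_cases h : c = a
        · simp [h]; have := hd a; omega
        · simp [h]; exact hd c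
      rw [ih _ hd']
      constructor
      · intro h c
        have hc := h c
        rw [PySem.Dict.getD_insert] at hc
        by_cases hca : c = a
        · subst hca; simp at hc; simp; omega
        · simp [hca] at hc; simp [Ne.symm hca]; omega
      · intro h c
        rw [PySem.Dict.getD_insert]
        have hc := h c
        by_cases hca : c = a
        · subst hca; simp at hc; simp; omega
        · simp [Ne.symm hca] at hc; simp [hca]; omega

-- both sides characterised by the same count inequality
theorem is_cover_iff (str1 str2 : String) :
    is_cover str1 str2 = true ↔
      ∀ c, (str2.toList.count c : Int) ≤ (str1.toList.count c : Int) := by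
  unfold is_cover
  simp only [List.all_eq_true, Bool.and_eq_true, Bool.not_eq_true',
    decide_eq_false_iff_not, getD_countFoldA, contains_countFoldA,
    PySem.Dict.getD_empty, PySem.Dict.contains_empty, Bool.false_or, zero_add]
  constructor
  · intro h c
    by_cases hc : c ∈ str2.toList
    · have := (h c hc).2; omega
    · have : str2.toList.count c = 0 := List.count_eq_zero.mpr hc
      simp [this]
  · intro h i hi
    have h2 : 1 ≤ str2.toList.count i := List.one_le_count_iff.mpr hi
    have := h i
    refine ⟨?_, by omega⟩
    have h1 : 1 ≤ str1.toList.count i := by omega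
    simpa using List.one_le_count_iff.mp h1
theorem is_cover_alt_iff (str1 str2 : String) :
    is_cover_alt str1 str2 = true ↔
      ∀ c, (str2.toList.count c : Int) ≤ (str1.toList.count c : Int) := by
  unfold is_cover_alt
  rw [coverLoop_eq]
  · constructor <;> intro h c <;> have := h c <;>
      simpa [getD_countFoldB, PySem.Dict.getD_empty] using this
  · intro c; simp [getD_countFoldB, PySem.Dict.getD_empty]

-- ===== VERDICT (by name: the statement is the Claim_ definition above) =====
theorem is_cover_spec : Claim_equal_is_cover := by
  intro str1 str2 _
  unfold Spec_is_cover
  rw [Bool.eq_iff_iff, is_cover_iff, is_cover_alt_iff]
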